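-- pv_equiv track=rewrite | github.com/L2dulgi/SIL-C | src/SILGym/models/skill_interface/ptgm.py | _split_by_trajectory
-- ===== SOURCE A (Python) =====
-- def _split_by_trajectory(terminals):
--     """
--     Given a terminals array (0/1) of length T, return a list of (start_idx, end_idx) tuples for each trajectory.
--     """
--     traj_indices = []
--     start_idx = 0
--     for i, val in enumerate(terminals):
--         if val == 1:
--             traj_indices.append((start_idx, i))
--             start_idx = i + 1
--     return traj_indices
-- ===== SOURCE B (Python) =====
-- def _split_by_trajectory(terminals):
--     ends = [i for i, v in enumerate(terminals) if v == 1]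
--     starts = [0] + [e + 1 for e in ends[:-1]]
--     return list(zip(starts, ends))
-- ===== Notes on version B (the rewrite author's own statement) =====
-- stated objective: alternative
-- what changed: Instead of threading a running start_idx through one loop, B collects all terminal positions in one comprehension, derives the starts by shifting that list, and zips the two.
import Mathlib
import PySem

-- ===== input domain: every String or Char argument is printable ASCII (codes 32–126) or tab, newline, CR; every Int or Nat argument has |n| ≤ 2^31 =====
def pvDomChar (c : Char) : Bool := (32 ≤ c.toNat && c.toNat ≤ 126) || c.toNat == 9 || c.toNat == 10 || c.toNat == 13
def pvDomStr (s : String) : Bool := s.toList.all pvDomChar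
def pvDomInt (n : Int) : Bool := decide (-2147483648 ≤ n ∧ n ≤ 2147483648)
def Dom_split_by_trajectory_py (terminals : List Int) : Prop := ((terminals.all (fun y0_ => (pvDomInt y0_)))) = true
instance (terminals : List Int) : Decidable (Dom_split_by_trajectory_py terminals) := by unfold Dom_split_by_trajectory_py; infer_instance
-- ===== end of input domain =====

-- B replaces A's single running-start_idx loop by a boundary-position comprehension,
-- a shifted starts list, and a zip (alternative decomposition, same O(n) cost).


-- ===== PORT A =====
-- literal port of A: one fold over enumerate(terminals) threading (traj_indices, start_idx)
def split_by_trajectory_py (terminals : List Int) : List (Int × Int) :=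
  ((PySem.List.enumerate terminals).foldl
    (fun (st : List (Int × Int) × Int) (p : Int × Int) =>
      if p.2 == 1 then (st.1 ++ [(st.2, p.1)], p.1 + 1) else st)
    (([] : List (Int × Int)), (0 : Int))).1

-- ===== PORT B =====
-- literal port of B: ends = [i for i,v in enumerate(..) if v==1]; starts = [0]+[e+1 for e in ends[:-1]]; zip
def split_by_trajectory_py_alt (terminals : List Int) : List (Int × Int) :=
  let ends := (PySem.List.enumerate terminals).filterMap
    (fun (p : Int × Int) => if p.2 == 1 then some p.1 else none)
  let starts := (0 : Int) :: ends.dropLast.map (· + 1)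
  starts.zip ends

-- ===== PRECONDITION & SPEC =====
def Spec_split_by_trajectory_py (terminals : List Int) (out : List (Int × Int)) : Prop := out = split_by_trajectory_py_alt terminals
instance (terminals : List Int) (out : List (Int × Int)) : Decidable (Spec_split_by_trajectory_py terminals out) := by unfold Spec_split_by_trajectory_py; infer_instance

-- ===== CLAIM (what is proved, stated in full; the proofs are below) =====
def Claim_equal_split_by_trajectory_py : Prop := ∀ (terminals : List Int), Dom_split_by_trajectory_py terminals → Spec_split_by_trajectory_py terminals (split_by_trajectory_py terminals)

-- ===== LEMMAS AND PROOFS =====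

-- common normal form: pair each end with the running start
def pvPairs : Int → List Int → List (Int × Int)
  | _, [] => []
  | s, e :: rest => (s, e) :: pvPairs (e + 1) rest

-- final value of start_idx after consuming ends E from start s
def pvFinal : Int → List Int → Int
  | s, [] => s
  | _, e :: rest => pvFinal (e + 1) rest

lemma foldA_eq_pvPairs (ts : List Int) (s : Int) (acc : List (Int × Int)) (st : Int) :
    (PySem.List.enumerate ts s).foldl
      (fun (q : List (Int × Int) × Int) (p : Int × Int) =>
        if p.2 == 1 then (q.1 ++ [(q.2, p.1)], p.1 + 1) else q)
      (acc, st) =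
    (acc ++ pvPairs st ((PySem.List.enumerate ts s).filterMap
        (fun (p : Int × Int) => if p.2 == 1 then some p.1 else none)),
     pvFinal st ((PySem.List.enumerate ts s).filterMap
        (fun (p : Int × Int) => if p.2 == 1 then some p.1 else none))) := by
  induction ts generalizing s acc st with
  | nil => simp [PySem.List.enumerate_nil, pvPairs, pvFinal]
  | cons x xs ih =>
    by_cases hx : x = 1
    · have hb : (x == (1 : Int)) = true := by simp [hx]
      simp only [PySem.List.enumerate_cons, List.foldl_cons, List.filterMap_cons, hb, if_true,
        pvPairs, pvFinal, ih]
      simp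
    · have hb : (x == (1 : Int)) = false := by simp [hx]
      simp only [PySem.List.enumerate_cons, List.foldl_cons, List.filterMap_cons, hb, ih]
      simp

lemma zip_shift_eq_pvPairs (E : List Int) (s : Int) :
    (s :: E.dropLast.map (· + 1)).zip E = pvPairs s E := by
  induction E generalizing s with
  | nil => simp [pvPairs]
  | cons e rest ih =>
    cases rest with
    | nil => simp [pvPairs]
    | cons r rs =>
      simp only [List.dropLast_cons₂, List.map_cons, List.zip_cons_cons, pvPairs]
      exact congrArg _ (ih (e + 1))

-- ===== VERDICT (by name: the statement is the Claim_ definition above) =====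
theorem split_by_trajectory_py_spec : Claim_equal_split_by_trajectory_py := by
  intro terminals _
  unfold Spec_split_by_trajectory_py split_by_trajectory_py split_by_trajectory_py_alt
  rw [foldA_eq_pvPairs, zip_shift_eq_pvPairs]
  simp
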